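-- pv_equiv track=rewrite | github.com/KMaciejewsk/AiSD | sortowanie.py | gen_ashape
-- ===== SOURCE A (Python) =====
-- def gen_ashape(n):
--     arr = []
--     temp = 1
--     for i in range(n//2):
--         arr.append(temp)
--         temp += 2
--     temp += 1
--     for i in range(n//2,n):
--         arr.append(temp)
--         temp -= 2
--     return arr
-- ===== SOURCE B (Python) =====
-- def gen_ashape(n):
--     m = n // 2
--     return [1 + 2*i if i < m else (2 + 2*m) - 2*(i - m) for i in range(n)]
-- ===== Notes on version B (the rewrite author's own statement) =====
-- stated objective: simpler
-- what changed: Replaces the two sequential append-loops with a running temp accumulator by a single comprehension computing each element from its index in closed form.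
import Mathlib
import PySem

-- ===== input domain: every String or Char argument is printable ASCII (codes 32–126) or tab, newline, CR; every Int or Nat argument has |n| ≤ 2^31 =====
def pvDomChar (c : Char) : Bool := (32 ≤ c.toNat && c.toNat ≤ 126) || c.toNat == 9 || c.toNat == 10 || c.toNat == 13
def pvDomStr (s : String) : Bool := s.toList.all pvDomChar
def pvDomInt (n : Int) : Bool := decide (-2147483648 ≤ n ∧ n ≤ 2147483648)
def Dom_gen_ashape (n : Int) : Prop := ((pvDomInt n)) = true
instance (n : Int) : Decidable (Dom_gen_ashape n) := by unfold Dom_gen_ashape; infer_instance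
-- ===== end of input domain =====

-- B builds each element by a closed-form per-index formula instead of A's two append-loops with a running accumulator (objective: simpler).

-- ===== PORT A =====
def gen_ashape (n : Int) : List Int :=
  let m := PySem.Int.floordiv n 2
  let s1 := (PySem.List.pyRange 0 m 1).foldl
      (fun (st : List Int × Int) _ => (st.1 ++ [st.2], st.2 + 2)) ([], 1)
  let temp := s1.2 + 1
  let s2 := (PySem.List.pyRange m n 1).foldl
      (fun (st : List Int × Int) _ => (st.1 ++ [st.2], st.2 - 2)) (s1.1, temp)
  s2.1

-- ===== PORT B =====
def gen_ashape_alt (n : Int) : List Int :=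
  let m := PySem.Int.floordiv n 2
  (PySem.List.pyRange 0 n 1).map
    (fun i => if i < m then 1 + 2 * i else (2 + 2 * m) - 2 * (i - m))

-- ===== PRECONDITION & SPEC =====
def Spec_gen_ashape (n : Int) (out : List Int) : Prop := out = gen_ashape_alt n
instance (n : Int) (out : List Int) : Decidable (Spec_gen_ashape n out) := by unfold Spec_gen_ashape; infer_instance

-- ===== CLAIM (what is proved, stated in full; the proofs are below) =====
def Claim_equal_gen_ashape : Prop := ∀ (n : Int), Dom_gen_ashape n → Spec_gen_ashape n (gen_ashape n)

-- ===== LEMMAS AND PROOFS =====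

-- A's append loop, characterised: state after folding any list is (acc ++ arithmetic run, advanced temp).
lemma foldl_append_run (d : Int) (l : List Int) (acc : List Int) (t : Int) :
    l.foldl (fun (st : List Int × Int) _ => (st.1 ++ [st.2], st.2 + d)) (acc, t)
      = (acc ++ (List.range l.length).map (fun k : Nat => t + d * (k : Int)),
         t + d * (l.length : Int)) := by
  induction l generalizing acc t with
  | nil => simp
  | cons x xs ih =>
      simp only [List.foldl_cons, ih, List.length_cons]
      refine Prod.ext ?_ ?_
      · have hfun : (fun k : Nat => (t + d) + d * (k : Int))
            = fun k : Nat => t + d * (((k + 1 : Nat) : Nat) : Int) := by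
          funext k; push_cast; ring
        rw [hfun, List.range_succ_eq_map, List.map_cons, List.map_map]
        simp [Function.comp]
      · push_cast; ring

-- same characterisation for the decreasing loop
lemma foldl_append_run_sub (l : List Int) (acc : List Int) (t : Int) :
    l.foldl (fun (st : List Int × Int) _ => (st.1 ++ [st.2], st.2 - 2)) (acc, t)
      = (acc ++ (List.range l.length).map (fun k : Nat => t - 2 * (k : Int)),
         t - 2 * (l.length : Int)) := by
  induction l generalizing acc t with
  | nil => simp
  | cons x xs ih =>
      simp only [List.foldl_cons, ih, List.length_cons]
      refine Prod.ext ?_ ?_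
      · have hfun : (fun k : Nat => (t - 2) - 2 * (k : Int))
            = fun k : Nat => t - 2 * (((k + 1 : Nat) : Nat) : Int) := by
          funext k; push_cast; ring
        rw [hfun, List.range_succ_eq_map, List.map_cons, List.map_map]
        simp [Function.comp]
      · push_cast; ring

theorem gen_ashape_spec : Claim_equal_gen_ashape := by
  intro n _
  unfold Spec_gen_ashape
  simp only [gen_ashape, gen_ashape_alt]
  rw [PySem.Int.floordiv_eq_ediv_of_pos (by omega : (0:Int) < 2)]
  set m := n / 2 with hm
  by_cases hn : n ≤ 0
  · have h1 : m ≤ 0 := by omega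
    have h2 : n ≤ m := by omega
    rw [PySem.List.pyRange_one_eq_nil h1, PySem.List.pyRange_one_eq_nil h2,
        PySem.List.pyRange_one_eq_nil hn]
    simp
  · have hn' : 0 < n := by omega
    have hm0 : 0 ≤ m := by omega
    have hmn : m ≤ n := by omega
    rw [PySem.List.pyRange_one_append 0 m n hm0 hmn]
    simp only [List.map_append]
    rw [foldl_append_run, foldl_append_run_sub]
    have hlen1 : (PySem.List.pyRange 0 m 1).length = m.toNat := by
      rw [PySem.List.length_pyRange_one]; omega
    have hlen2 : (PySem.List.pyRange m n 1).length = (n - m).toNat := by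
      rw [PySem.List.length_pyRange_one]
    simp only [hlen1, hlen2, List.nil_append]
    have hmt : (m.toNat : Int) = m := by omega
    congr 1
    · rw [PySem.List.pyRange_one, List.map_map]
      simp only [sub_zero]
      apply List.map_congr_left
      intro k hk
      simp only [List.mem_range] at hk
      have hk' : ((0 : Int) + (k : Int)) < m := by omega
      simp only [Function.comp, hk', if_pos]
      ring
    · rw [PySem.List.pyRange_one, List.map_map]
      apply List.map_congr_left
      intro k hk
      simp only [List.mem_range] at hk
      have hk' : ¬ (m + (k : Int) < m) := by omega
      simp only [Function.comp, hk', if_false, hmt]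
      ring

-- ===== VERDICT (by name: the statement is the Claim_ definition above) =====
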